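-- pv_equiv track=rewrite | github.com/ArnavG-728/PR_Review_Agent | backend/pr_review_agent/generate_feedback.py | smart_truncate_diff_enhanced
-- ===== SOURCE A (Python) =====
-- def smart_truncate_diff_enhanced(diff_text: str, max_chars: int = 12000) -> str:
--     """Enhanced diff truncation with better context preservation."""
--     if len(diff_text) <= max_chars:
--         return diff_text
--
--     lines = diff_text.split('\n')
--     truncated_diff = []
--     current_chars = 0
--
--     # Preserve file headers and important context
--     important_line_patterns = [
--         lambda line: line.startswith('+++') or line.startswith('---'),  # File headers
--         lambda line: line.startswith('@@'),  # Hunk headers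
--         lambda line: line.startswith('+') or line.startswith('-'),  # Changes
--         lambda line: 'TODO' in line or 'FIXME' in line or 'HACK' in line,  # Important comments
--     ]
--
--     # First pass: collect all important lines
--     important_lines = []
--     regular_lines = []
--
--     for line in lines:
--         is_important = any(pattern(line) for pattern in important_line_patterns)
--         if is_important:
--             important_lines.append(line)
--         else:
--             regular_lines.append(line)
--
--     # Add important lines first
--     for line in important_lines:
--         if current_chars + len(line) + 1 <= max_chars:
--             truncated_diff.append(line)
--             current_chars += len(line) + 1
--         else:
--             break
--
--     # Add regular lines if space permits
--     for line in regular_lines: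
--         if current_chars + len(line) + 1 <= max_chars:
--             truncated_diff.append(line)
--             current_chars += len(line) + 1
--         else:
--             break
--
--     if len(truncated_diff) < len(lines):
--         truncated_diff.append(f"\n... [Diff truncated: showing {len(truncated_diff)}/{len(lines)} lines] ...")
--
--     return '\n'.join(truncated_diff)
-- ===== SOURCE B (Python) =====
-- import bisect
-- from itertools import accumulate
--
--
-- def smart_truncate_diff_enhanced(diff_text: str, max_chars: int = 12000) -> str:
--     """Sort-and-bisect: a stable sort brings important lines first, one cumulative
--     cost table over that ordering, and two binary searches pick the kept counts."""
--     if len(diff_text) <= max_chars: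
--         return diff_text
--
--     lines = diff_text.split('\n')
--
--     def rank(line):  # 0 = important, 1 = regular
--         if line.startswith('+') or line.startswith('-') or line.startswith('@@'):
--             return 0
--         if 'TODO' in line or 'FIXME' in line or 'HACK' in line:
--             return 0
--         return 1
--
--     ordered = sorted(lines, key=rank)  # stable: important first, original order kept per class
--     n_imp = sum(1 for l in lines if rank(l) == 0)
--
--     pre = list(accumulate(len(l) + 1 for l in ordered))  # one cumulative cost table
--     k1 = bisect.bisect_right(pre[:n_imp], max_chars)
--     used = pre[k1 - 1] if k1 else 0
--     total_imp = pre[n_imp - 1] if n_imp else 0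
--     # the regular budget restarts at max_chars - used, independent of the important cutoff
--     k2 = bisect.bisect_right(pre[n_imp:], max_chars - used + total_imp)
--
--     kept = ordered[:k1] + ordered[n_imp:n_imp + k2]
--     if len(kept) < len(lines):
--         kept.append(f"\n... [Diff truncated: showing {len(kept)}/{len(lines)} lines] ...")
--     return '\n'.join(kept)
-- ===== Notes on version B (the rewrite author's own statement) =====
-- stated objective: alternative
-- what changed: Replaces A's explicit partition pass and two appending greedy loops (mutable list + running char counter with break) by a stable sort on a 0/1 importance rank that brings important lines first, a single itertools.accumulate cumulative-cost table over that ordering, and two bisect.bisect_right binary searches (with offset arithmetic for the regular lines' independent budget) that yield the two slice lengths.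
import Mathlib
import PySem

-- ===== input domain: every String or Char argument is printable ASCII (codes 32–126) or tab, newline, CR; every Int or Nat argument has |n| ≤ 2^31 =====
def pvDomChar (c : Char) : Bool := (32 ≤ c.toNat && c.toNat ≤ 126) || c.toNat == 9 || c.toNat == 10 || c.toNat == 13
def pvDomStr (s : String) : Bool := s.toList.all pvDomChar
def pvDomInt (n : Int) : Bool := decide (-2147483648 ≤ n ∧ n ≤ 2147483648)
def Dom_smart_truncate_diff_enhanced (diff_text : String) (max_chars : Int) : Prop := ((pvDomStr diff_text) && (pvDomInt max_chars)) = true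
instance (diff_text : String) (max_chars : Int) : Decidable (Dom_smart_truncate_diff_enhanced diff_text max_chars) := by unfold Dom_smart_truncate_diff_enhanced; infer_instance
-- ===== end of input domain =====

-- B replaces A's two appending greedy loops by a stable sort (important lines first), a
-- single cumulative cost table and two binary searches (bisect); objective: alternative.

-- ===== PORT A =====

-- A's importance test: any of the four patterns, in A's order
def pvImpA (line : String) : Bool :=
  (PySem.Str.startswith line "+++" || PySem.Str.startswith line "---") ||
  PySem.Str.startswith line "@@" ||
  (PySem.Str.startswith line "+" || PySem.Str.startswith line "-") ||
  (PySem.Str.isIn "TODO" line || PySem.Str.isIn "FIXME" line || PySem.Str.isIn "HACK" line)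

-- A's classification loop: append to important/regular lists
def pvPartA : List String → List String × List String → List String × List String
  | [], p => p
  | l :: rest, p =>
    if pvImpA l then pvPartA rest (p.1 ++ [l], p.2) else pvPartA rest (p.1, p.2 ++ [l])

-- A's greedy add loop with break, carrying (truncated_diff, current_chars)
def pvAddLoop (max_chars : Int) : List String → List String → Int → List String × Int
  | [], acc, cur => (acc, cur)
  | l :: rest, acc, cur =>
    if cur + PySem.Str.len l + 1 ≤ max_chars then
      pvAddLoop max_chars rest (acc ++ [l]) (cur + PySem.Str.len l + 1)
    else (acc, cur)

def smart_truncate_diff_enhanced (diff_text : String) (max_chars : Int) : String :=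
  if PySem.Str.len diff_text ≤ max_chars then diff_text
  else
    let lines := (PySem.Str.split? diff_text "\n").getD []
    let p := pvPartA lines ([], [])
    let r1 := pvAddLoop max_chars p.1 [] 0
    let r2 := pvAddLoop max_chars p.2 r1.1 r1.2
    let td := r2.1
    if td.length < lines.length then
      PySem.Str.join "\n" (td ++ ["\n... [Diff truncated: showing " ++ PySem.Int.toStr (td.length : Int) ++ "/" ++ PySem.Int.toStr (lines.length : Int) ++ " lines] ..."])
    else PySem.Str.join "\n" td

-- ===== PORT B =====

-- B's rank: 0 = important, 1 = regular (the if-chain of Source B)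
def pvRank (line : String) : Int :=
  if PySem.Str.startswith line "+" || PySem.Str.startswith line "-" || PySem.Str.startswith line "@@" then 0
  else if PySem.Str.isIn "TODO" line || PySem.Str.isIn "FIXME" line || PySem.Str.isIn "HACK" line then 0
  else 1

-- itertools.accumulate of the per-line costs len(l)+1
def pvAccumCosts (acc : Int) : List String → List Int
  | [] => []
  | l :: rest => (acc + (PySem.Str.len l + 1)) :: pvAccumCosts (acc + (PySem.Str.len l + 1)) rest

def smart_truncate_diff_enhanced_alt (diff_text : String) (max_chars : Int) : String :=
  if PySem.Str.len diff_text ≤ max_chars then diff_text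
  else
    let lines := (PySem.Str.split? diff_text "\n").getD []
    let ordered := PySem.List.sorted lines pvRank false
    let n_imp := lines.countP (fun l => pvRank l == 0)   -- sum(1 for l in lines if rank(l)==0)
    let pre := pvAccumCosts 0 ordered
    let k1 := PySem.List.bisectRight (pre.take n_imp) max_chars        -- bisect_right(pre[:n_imp], max_chars)
    let used := if k1 == 0 then 0 else PySem.List.pyGetD pre ((k1 : Int) - 1) 0
    let total_imp := if n_imp == 0 then 0 else PySem.List.pyGetD pre ((n_imp : Int) - 1) 0
    let k2 := PySem.List.bisectRight (pre.drop n_imp) (max_chars - used + total_imp)  -- bisect_right(pre[n_imp:], …)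
    let kept := ordered.take k1 ++ (ordered.drop n_imp).take k2        -- ordered[:k1] + ordered[n_imp:n_imp+k2]
    if kept.length < lines.length then
      PySem.Str.join "\n" (kept ++ ["\n... [Diff truncated: showing " ++ PySem.Int.toStr (kept.length : Int) ++ "/" ++ PySem.Int.toStr (lines.length : Int) ++ " lines] ..."])
    else PySem.Str.join "\n" kept

-- ===== PRECONDITION & SPEC =====
def Spec_smart_truncate_diff_enhanced (diff_text : String) (max_chars : Int) (out : String) : Prop := out = smart_truncate_diff_enhanced_alt diff_text max_chars
instance (diff_text : String) (max_chars : Int) (out : String) : Decidable (Spec_smart_truncate_diff_enhanced diff_text max_chars out) := by unfold Spec_smart_truncate_diff_enhanced; infer_instance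

-- ===== CLAIM (what is proved, stated in full; the proofs are below) =====
def Claim_equal_smart_truncate_diff_enhanced : Prop := ∀ (diff_text : String) (max_chars : Int), Dom_smart_truncate_diff_enhanced diff_text max_chars → Spec_smart_truncate_diff_enhanced diff_text max_chars (smart_truncate_diff_enhanced diff_text max_chars)

-- ===== LEMMAS AND PROOFS =====

-- the cutoff count used throughout the proofs: leading cumulative costs within budget
def pvCutoff (ls : List String) (budget : Int) : Nat :=
  ((pvAccumCosts 0 ls).takeWhile (fun c => decide (c ≤ budget))).length

-- A's importance test agrees with B's rank ('+++'/'---' prefixes are subsumed by '+'/'-')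
theorem pvImp_eq_rank (l : String) : pvImpA l = (pvRank l == 0) := by
  simp only [pvImpA, pvRank, PySem.Str.startswith_eq, PySem.Str.isIn_eq]
  have h1 : PySem.Chars.startswith l.toList ['+', '+', '+'] = true →
      PySem.Chars.startswith l.toList ['+'] = true := fun h =>
    (PySem.Chars.startswith_iff _ _).mpr
      (List.IsPrefix.trans (by decide) ((PySem.Chars.startswith_iff _ _).mp h))
  have h2 : PySem.Chars.startswith l.toList ['-', '-', '-'] = true →
      PySem.Chars.startswith l.toList ['-'] = true := fun h =>
    (PySem.Chars.startswith_iff _ _).mpr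
      (List.IsPrefix.trans (by decide) ((PySem.Chars.startswith_iff _ _).mp h))
  by_cases hp : PySem.Chars.startswith l.toList ['+', '+', '+'] = true
  · simp [hp, h1 hp]
  · by_cases hm : PySem.Chars.startswith l.toList ['-', '-', '-'] = true
    · simp [hm, h2 hm]
    · simp only [Bool.not_eq_true] at hp hm
      by_cases hA : (PySem.Chars.startswith l.toList ['+'] || PySem.Chars.startswith l.toList ['-']
          || PySem.Chars.startswith l.toList ['@', '@']) = true
      · simp only [Bool.or_eq_true] at hA
        rcases hA with (h | h) | h <;> simp [h, hp, hm]
      · simp only [Bool.or_eq_true, not_or, Bool.not_eq_true] at hA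
        obtain ⟨⟨ha, hb⟩, hc⟩ := hA
        by_cases hT : (PySem.Chars.isIn ('T'::'O'::'D'::'O'::[]) l.toList
            || PySem.Chars.isIn ('F'::'I'::'X'::'M'::'E'::[]) l.toList
            || PySem.Chars.isIn ('H'::'A'::'C'::'K'::[]) l.toList) = true
        · simp only [Bool.or_eq_true] at hT
          rcases hT with (h | h) | h <;> simp [h, hp, hm, ha, hb, hc]
        · simp only [Bool.or_eq_true, not_or, Bool.not_eq_true] at hT
          obtain ⟨⟨hd, he⟩, hf⟩ := hT
          simp [hp, hm, ha, hb, hc, hd, he, hf]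

-- pvRank only takes the values 0 and 1
theorem pvRank_cases (l : String) : pvRank l = 0 ∨ pvRank l = 1 := by
  unfold pvRank; split_ifs <;> simp

-- insertBy places x between a not-before block and a before block
theorem pvInsertBy_mid (before : String → String → Bool) (x : String) (F0 F1 : List String)
    (h0 : ∀ a ∈ F0, before x a = false) (h1 : ∀ b ∈ F1, before x b = true) :
    PySem.List.insertBy before x (F0 ++ F1) = F0 ++ x :: F1 := by
  induction F0 with
  | nil =>
    cases F1 with
    | nil => simp [PySem.List.insertBy]
    | cons b bs => simp [PySem.List.insertBy, h1 b (by simp)]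
  | cons a as ih =>
    simp only [List.cons_append, PySem.List.insertBy, h0 a (by simp), Bool.false_eq_true,
      if_false, List.cons.injEq, true_and]
    exact ih (fun a' ha' => h0 a' (by simp [ha']))

-- the stable sort by a {0,1}-valued rank is the stable two-class partition
theorem pvSorted_partition (ls : List String) :
    PySem.List.sorted ls pvRank false
      = ls.filter (fun l => pvRank l == 0) ++ ls.filter (fun l => !(pvRank l == 0)) := by
  rw [PySem.List.sorted_eq_foldl_insertBy]
  suffices h : ∀ (xs F0 F1 : List String), (∀ a ∈ F0, pvRank a = 0) → (∀ b ∈ F1, pvRank b = 1) →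
      xs.foldl (fun acc x => PySem.List.insertBy (fun a b => decide (pvRank a < pvRank b)) x acc) (F0 ++ F1)
        = (F0 ++ xs.filter (fun l => pvRank l == 0)) ++ (F1 ++ xs.filter (fun l => !(pvRank l == 0))) by
    have := h ls [] [] (by simp) (by simp)
    simpa using this
  intro xs
  induction xs with
  | nil => intro F0 F1 _ _; simp
  | cons x rest ih =>
    intro F0 F1 hF0 hF1
    rcases pvRank_cases x with hx | hx
    · have hins : PySem.List.insertBy (fun a b => decide (pvRank a < pvRank b)) x (F0 ++ F1)
          = (F0 ++ [x]) ++ F1 := by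
        rw [pvInsertBy_mid _ _ F0 F1
          (fun a ha => by simp [hx, hF0 a ha])
          (fun b hb => by simp [hx, hF1 b hb])]
        simp
      have hF0' : ∀ a ∈ F0 ++ [x], pvRank a = 0 := by
        intro a ha
        rcases List.mem_append.mp ha with h | h
        · exact hF0 a h
        · simp at h; subst h; exact hx
      simp only [List.foldl_cons, hins]
      rw [ih (F0 ++ [x]) F1 hF0' hF1]
      simp [hx, List.append_assoc]
    · have hins : PySem.List.insertBy (fun a b => decide (pvRank a < pvRank b)) x (F0 ++ F1)
          = F0 ++ (F1 ++ [x]) := by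
        rw [← List.append_assoc]
        apply PySem.List.insertBy_of_forall_not_before
        intro y hy
        rcases List.mem_append.mp hy with h | h
        · simp [hx, hF0 y h]
        · simp [hx, hF1 y h]
      have hF1' : ∀ b ∈ F1 ++ [x], pvRank b = 1 := by
        intro b hb
        rcases List.mem_append.mp hb with h | h
        · exact hF1 b h
        · simp at h; subst h; exact hx
      simp only [List.foldl_cons, hins]
      rw [ih F0 (F1 ++ [x]) hF0 hF1']
      simp [hx, List.append_assoc]

-- accumulate of an append splits, the tail shifted by the head's total cost
theorem pvAccumCosts_append (xs ys : List String) (a : Int) :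
    pvAccumCosts a (xs ++ ys)
      = pvAccumCosts a xs ++ pvAccumCosts (a + (xs.map (fun l => PySem.Str.len l + 1)).sum) ys := by
  induction xs generalizing a with
  | nil => simp [pvAccumCosts]
  | cons l rest ih =>
    simp only [List.cons_append, pvAccumCosts, ih, List.map_cons, List.sum_cons, List.cons.injEq,
      true_and]
    ring_nf

theorem pvAccumCosts_length (ls : List String) (a : Int) :
    (pvAccumCosts a ls).length = ls.length := by
  induction ls generalizing a with
  | nil => rfl
  | cons l rest ih => simp [pvAccumCosts, ih]

-- accumulate started at a is accumulate started at 0, shifted by a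
theorem pvAccumCosts_shift (ls : List String) (a : Int) :
    pvAccumCosts a ls = (pvAccumCosts 0 ls).map (fun c => a + c) := by
  induction ls generalizing a with
  | nil => simp [pvAccumCosts]
  | cons l rest ih =>
    simp only [pvAccumCosts, List.map_cons]
    rw [ih (a + (PySem.Str.len l + 1)), ih (0 + (PySem.Str.len l + 1)), List.map_map]
    refine congrArg₂ List.cons (by ring) ?_
    refine List.map_congr_left (fun c _ => ?_)
    simp only [Function.comp_apply]
    ring

theorem pvCutoff_shift (ls : List String) (a budget : Int) :
    ((pvAccumCosts a ls).takeWhile (fun c => decide (c ≤ budget))).length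
      = pvCutoff ls (budget - a) := by
  unfold pvCutoff
  rw [pvAccumCosts_shift, List.takeWhile_map, List.length_map]
  have : ((fun c => decide (c ≤ budget)) ∘ fun c => a + c)
      = (fun c : Int => decide (c ≤ budget - a)) := by
    funext c
    simp only [Function.comp_apply, decide_eq_decide]
    omega
  rw [this]

-- the cumulative cost table is (strictly) increasing, hence sorted
theorem pvAccumCosts_lt (ls : List String) (a : Int) :
    (pvAccumCosts a ls).Pairwise (fun x y => x < y) := by
  induction ls generalizing a with
  | nil => simp [pvAccumCosts]
  | cons l rest ih =>
    simp only [pvAccumCosts, List.pairwise_cons]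
    refine ⟨fun c hc => ?_, ih _⟩
    have hlen : (0 : Int) ≤ PySem.Str.len l := by
      simp [PySem.Str.len_eq]
    -- entries of pvAccumCosts b ms are > b since every cost is ≥ 1
    have key : ∀ (ms : List String) (b : Int), ∀ c ∈ pvAccumCosts b ms, b < c := by
      intro ms
      induction ms with
      | nil => intro b c hc; simp [pvAccumCosts] at hc
      | cons m mrest ihm =>
        intro b c hc
        simp only [pvAccumCosts, List.mem_cons] at hc
        have hm : (0 : Int) ≤ PySem.Str.len m := by simp [PySem.Str.len_eq]
        rcases hc with rfl | hc
        · omega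
        · have := ihm (b + (PySem.Str.len m + 1)) c hc
          omega
    exact key rest _ c hc
-- for a sorted table, bisect_right is the takeWhile cutoff
theorem pvBisect_eq_cutoff (pre : List Int) (x : Int) (hs : pre.Pairwise (fun a b => a ≤ b)) :
    PySem.List.bisectRight pre x = (pre.takeWhile (fun c => decide (c ≤ x))).length := by
  obtain ⟨hle, hlow, hhigh⟩ := PySem.List.bisectRight_spec pre x hs
  set k := PySem.List.bisectRight pre x with hk
  clear_value k
  clear hk
  induction pre generalizing k with
  | nil => simp_all
  | cons c rest ih =>
    by_cases hc : c ≤ x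
    · rw [List.takeWhile_cons_of_pos (by simpa using hc), List.length_cons]
      have hkpos : 0 < k := by
        by_contra h
        have : k ≤ 0 := by omega
        have := hhigh 0 (by simp) (by omega)
        simp at this
        omega
      have : k - 1 = (rest.takeWhile (fun c => decide (c ≤ x))).length := by
        refine ih (List.Pairwise.sublist (List.sublist_cons_self c rest) hs) (k - 1)
          (by simp at hle; omega) ?_ ?_
        · intro j hj hjk
          have := hlow (j + 1) (by simpa using Nat.succ_lt_succ hj) (by omega)
          simpa using this
        · intro j hj hjk
          have := hhigh (j + 1) (by simpa using Nat.succ_lt_succ hj) (by omega)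
          simpa using this
      omega
    · rw [List.takeWhile_cons_of_neg (by simpa using hc)]
      by_contra h
      have hkpos : 0 < k := by
        simp only [List.length_nil] at h
        omega
      have := hlow 0 (by simp) (by omega)
      simp at this
      omega

-- entries of the cumulative table are the partial sums
theorem pvAccumCosts_getElem (ls : List String) (a : Int) (j : Nat) (hj : j < ls.length) :
    (pvAccumCosts a ls)[j]'(by rw [pvAccumCosts_length]; exact hj)
      = a + ((ls.take (j + 1)).map (fun l => PySem.Str.len l + 1)).sum := by
  induction ls generalizing a j with
  | nil => simp at hj
  | cons l rest ih =>
    cases j with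
    | zero => simp [pvAccumCosts]
    | succ m =>
      simp only [pvAccumCosts, List.getElem_cons_succ, List.take_succ_cons, List.map_cons,
        List.sum_cons]
      rw [ih _ m (by simpa using hj)]
      ring

-- A's partition loop = two filters
theorem pvPartA_eq (ls : List String) (a b : List String) :
    pvPartA ls (a, b) = (a ++ ls.filter pvImpA, b ++ ls.filter (fun l => !pvImpA l)) := by
  induction ls generalizing a b with
  | nil => simp [pvPartA]
  | cons l rest ih =>
    by_cases h : pvImpA l <;> simp [pvPartA, h, ih]

-- A's greedy add loop computed by the prefix-sum cutoff
theorem pvAddLoop_eq (max_chars : Int) (ls : List String) (acc : List String) (cur : Int) :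
    pvAddLoop max_chars ls acc cur
      = (acc ++ ls.take (pvCutoff ls (max_chars - cur)),
         cur + ((ls.take (pvCutoff ls (max_chars - cur))).map (fun l => PySem.Str.len l + 1)).sum) := by
  induction ls generalizing acc cur with
  | nil => simp [pvAddLoop, pvCutoff, pvAccumCosts]
  | cons l rest ih =>
    have hcut : pvCutoff (l :: rest) (max_chars - cur)
        = if cur + PySem.Str.len l + 1 ≤ max_chars
          then pvCutoff rest (max_chars - (cur + PySem.Str.len l + 1)) + 1
          else 0 := by
      unfold pvCutoff
      simp only [pvAccumCosts]
      by_cases h : cur + PySem.Str.len l + 1 ≤ max_chars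
      · rw [List.takeWhile_cons_of_pos (by simp only [decide_eq_true_eq]; omega),
          if_pos h, List.length_cons, pvCutoff_shift]
        have : max_chars - cur - (0 + (PySem.Str.len l + 1))
            = max_chars - (cur + PySem.Str.len l + 1) := by ring
        rw [this]
        rfl
      · rw [List.takeWhile_cons_of_neg (by simp only [decide_eq_true_eq]; omega), if_neg h]
        rfl
    by_cases h : cur + PySem.Str.len l + 1 ≤ max_chars
    · rw [show pvAddLoop max_chars (l :: rest) acc cur
          = pvAddLoop max_chars rest (acc ++ [l]) (cur + PySem.Str.len l + 1) by
            simp only [pvAddLoop, if_pos h]]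
      rw [ih, hcut, if_pos h]
      simp only [List.take_succ_cons, List.map_cons, List.sum_cons, Prod.mk.injEq]
      constructor
      · simp [List.append_assoc]
      · ring
    · rw [show pvAddLoop max_chars (l :: rest) acc cur = (acc, cur) by
            simp only [pvAddLoop, if_neg h]]
      rw [hcut, if_neg h]
      simp

-- the kept-lines list of A equals the kept-lines list of B
theorem pvKept_eq (lines : List String) (max_chars : Int) :
    (pvAddLoop max_chars (pvPartA lines ([], [])).2
        (pvAddLoop max_chars (pvPartA lines ([], [])).1 [] 0).1
        (pvAddLoop max_chars (pvPartA lines ([], [])).1 [] 0).2).1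
      = (PySem.List.sorted lines pvRank false).take
          (PySem.List.bisectRight ((pvAccumCosts 0 (PySem.List.sorted lines pvRank false)).take
            (lines.countP (fun l => pvRank l == 0))) max_chars)
        ++ ((PySem.List.sorted lines pvRank false).drop (lines.countP (fun l => pvRank l == 0))).take
          (PySem.List.bisectRight ((pvAccumCosts 0 (PySem.List.sorted lines pvRank false)).drop
              (lines.countP (fun l => pvRank l == 0)))
            (max_chars -
              (if PySem.List.bisectRight ((pvAccumCosts 0 (PySem.List.sorted lines pvRank false)).take
                    (lines.countP (fun l => pvRank l == 0))) max_chars == 0 then 0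
               else PySem.List.pyGetD (pvAccumCosts 0 (PySem.List.sorted lines pvRank false))
                 ((PySem.List.bisectRight ((pvAccumCosts 0 (PySem.List.sorted lines pvRank false)).take
                    (lines.countP (fun l => pvRank l == 0))) max_chars : Int) - 1) 0)
              + (if lines.countP (fun l => pvRank l == 0) == 0 then 0
                 else PySem.List.pyGetD (pvAccumCosts 0 (PySem.List.sorted lines pvRank false))
                   ((lines.countP (fun l => pvRank l == 0) : Int) - 1) 0))) := by
  -- names
  set F0 := lines.filter (fun l => pvRank l == 0) with hF0
  set F1 := lines.filter (fun l => !(pvRank l == 0)) with hF1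
  have hsort : PySem.List.sorted lines pvRank false = F0 ++ F1 := pvSorted_partition lines
  have hcount : lines.countP (fun l => pvRank l == 0) = F0.length := by
    rw [hF0, List.countP_eq_length_filter]
  have hfa : lines.filter pvImpA = F0 := by
    rw [hF0]; exact List.filter_congr (fun l _ => by rw [pvImp_eq_rank])
  have hfb : lines.filter (fun l => !pvImpA l) = F1 := by
    rw [hF1]; exact List.filter_congr (fun l _ => by rw [pvImp_eq_rank])
  have hpre : pvAccumCosts 0 (PySem.List.sorted lines pvRank false)
      = pvAccumCosts 0 F0 ++ pvAccumCosts (0 + (F0.map (fun l => PySem.Str.len l + 1)).sum) F1 := by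
    rw [hsort, pvAccumCosts_append]
  have hlen0 : (pvAccumCosts 0 F0).length = F0.length := pvAccumCosts_length F0 0
  -- the sliced tables
  have htake : (pvAccumCosts 0 (PySem.List.sorted lines pvRank false)).take
      (lines.countP (fun l => pvRank l == 0)) = pvAccumCosts 0 F0 := by
    rw [hpre, hcount, List.take_append_of_le_length (by omega), ← hlen0, List.take_length]
  have hdrop : (pvAccumCosts 0 (PySem.List.sorted lines pvRank false)).drop
      (lines.countP (fun l => pvRank l == 0))
      = pvAccumCosts ((F0.map (fun l => PySem.Str.len l + 1)).sum) F1 := by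
    rw [hpre, hcount, List.drop_append_of_le_length (by omega), ← hlen0, List.drop_length]
    simp
  -- k1 = pvCutoff F0 max_chars
  have hsorted0 : (pvAccumCosts 0 F0).Pairwise (fun a b => a ≤ b) :=
    (pvAccumCosts_lt F0 0).imp (fun h => le_of_lt h)
  have hk1 : PySem.List.bisectRight ((pvAccumCosts 0 (PySem.List.sorted lines pvRank false)).take
      (lines.countP (fun l => pvRank l == 0))) max_chars = pvCutoff F0 max_chars := by
    rw [htake, pvBisect_eq_cutoff _ _ hsorted0]; rfl
  set k1 := pvCutoff F0 max_chars with hk1def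
  have hk1le : k1 ≤ F0.length := by
    rw [hk1def]
    unfold pvCutoff
    calc ((pvAccumCosts 0 F0).takeWhile _).length ≤ (pvAccumCosts 0 F0).length :=
          List.Sublist.length_le (List.takeWhile_sublist _)
      _ = F0.length := hlen0
  -- used = sum of the first k1 costs of F0
  have hused : (if k1 == 0 then 0
      else PySem.List.pyGetD (pvAccumCosts 0 (PySem.List.sorted lines pvRank false))
        ((k1 : Int) - 1) 0)
      = ((F0.take k1).map (fun l => PySem.Str.len l + 1)).sum := by
    by_cases h0 : k1 = 0
    · simp [h0]
    · have hk1pos : 0 < k1 := Nat.pos_of_ne_zero h0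
      rw [if_neg (by simpa using h0)]
      have hidx : ((k1 : Int) - 1) = ((k1 - 1 : Nat) : Int) := by omega
      rw [hidx, PySem.List.pyGetD_natCast]
      have hlt : k1 - 1 < (pvAccumCosts 0 (PySem.List.sorted lines pvRank false)).length := by
        rw [pvAccumCosts_length, hsort, List.length_append]
        omega
      rw [List.getD_eq_getElem _ _ hlt]
      have hjlt : k1 - 1 < (PySem.List.sorted lines pvRank false).length := by
        rw [hsort, List.length_append]; omega
      rw [pvAccumCosts_getElem _ 0 (k1 - 1) hjlt]
      have htk : (PySem.List.sorted lines pvRank false).take (k1 - 1 + 1) = F0.take k1 := by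
        rw [hsort, List.take_append_of_le_length (by omega)]
        congr 1
        omega
      rw [htk]
      ring
  -- total_imp = full cost of F0
  have htotal : (if lines.countP (fun l => pvRank l == 0) == 0 then 0
      else PySem.List.pyGetD (pvAccumCosts 0 (PySem.List.sorted lines pvRank false))
        ((lines.countP (fun l => pvRank l == 0) : Int) - 1) 0)
      = (F0.map (fun l => PySem.Str.len l + 1)).sum := by
    rw [hcount]
    by_cases h0 : F0.length = 0
    · rw [if_pos (by simpa using h0)]
      rw [List.length_eq_zero_iff] at h0
      simp [h0]
    · have hpos : 0 < F0.length := Nat.pos_of_ne_zero h0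
      rw [if_neg (by simpa using h0)]
      have hidx : ((F0.length : Int) - 1) = ((F0.length - 1 : Nat) : Int) := by omega
      rw [hidx, PySem.List.pyGetD_natCast]
      have hlt : F0.length - 1 < (pvAccumCosts 0 (PySem.List.sorted lines pvRank false)).length := by
        rw [pvAccumCosts_length, hsort, List.length_append]; omega
      rw [List.getD_eq_getElem _ _ hlt]
      have hjlt : F0.length - 1 < (PySem.List.sorted lines pvRank false).length := by
        rw [hsort, List.length_append]; omega
      rw [pvAccumCosts_getElem _ 0 (F0.length - 1) hjlt]
      have htk : (PySem.List.sorted lines pvRank false).take (F0.length - 1 + 1) = F0 := by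
        rw [hsort, List.take_append_of_le_length (by omega)]
        have : F0.length - 1 + 1 = F0.length := by omega
        rw [this, List.take_length]
      rw [htk]
      ring
  -- k2 = pvCutoff F1 (max_chars - used)
  set used := ((F0.take k1).map (fun l => PySem.Str.len l + 1)).sum with husedDef
  set total := (F0.map (fun l => PySem.Str.len l + 1)).sum with htotalDef
  have hsorted1 : (pvAccumCosts total F1).Pairwise (fun a b => a ≤ b) :=
    (pvAccumCosts_lt F1 total).imp (fun h => le_of_lt h)
  have hk2 : PySem.List.bisectRight ((pvAccumCosts 0 (PySem.List.sorted lines pvRank false)).drop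
        (lines.countP (fun l => pvRank l == 0))) (max_chars - used + total)
      = pvCutoff F1 (max_chars - used) := by
    rw [hdrop, pvBisect_eq_cutoff _ _ hsorted1, pvCutoff_shift]
    congr 1
    ring
  -- assemble both sides
  rw [pvPartA_eq]
  simp only [List.nil_append]
  rw [hfa, hfb, pvAddLoop_eq, pvAddLoop_eq]
  simp only [List.nil_append, sub_zero, zero_add]
  rw [hk1, hused, htotal, hk2]
  rw [hsort, List.take_append_of_le_length (by omega), hcount,
    List.drop_append_of_le_length (le_of_eq rfl)]
  rw [List.drop_length]
  simp only [hk1def, husedDef, List.nil_append]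

-- ===== VERDICT (by name: the statement is the Claim_ definition above) =====
theorem smart_truncate_diff_enhanced_spec : Claim_equal_smart_truncate_diff_enhanced := by
  intro diff_text max_chars _
  unfold Spec_smart_truncate_diff_enhanced
  unfold smart_truncate_diff_enhanced smart_truncate_diff_enhanced_alt
  by_cases h0 : PySem.Str.len diff_text ≤ max_chars
  · rw [if_pos h0, if_pos h0]
  · rw [if_neg h0, if_neg h0]
    simp only [pvKept_eq]
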